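-- pv_equiv track=rewrite | github.com/Masoom-Wahid/Ds-Algos | alg/string/little_elephant_and_array.py | count
-- ===== SOURCE A (Python) =====
-- from collections import defaultdict
--
-- def count(arr,q):
--     result = 0
--     hashmap = defaultdict(int)
--     l,r = q
--     for i in range(l,r+1):
--        hashmap[arr[i]]+=1
--     for key,value in hashmap.items():
--         if int(key) == value : result+=1
--     return result
-- ===== SOURCE B (Python) =====
-- def count(arr, q):
--     # Sort-then-run-length reimplementation: same result as the hashmap version,
--     # obtained by sorting a copy of the queried slice and scanning equal runs.
--     l, r = q
--     sub = sorted(arr[i] for i in range(l, r + 1))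
--     result = 0
--     n = len(sub)
--     j = 0
--     while j < n:
--         x = sub[j]
--         k = j + 1
--         while k < n and sub[k] == x:
--             k += 1
--         if int(x) == k - j:
--             result += 1
--         j = k
--     return result
-- ===== Notes on version B (the rewrite author's own statement) =====
-- stated objective: alternative
-- what changed: Replaces the incrementally-maintained hashmap of frequencies with sorting a copy of the queried slice and scanning consecutive equal runs, counting a run when its element equals its length.
import Mathlib
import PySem

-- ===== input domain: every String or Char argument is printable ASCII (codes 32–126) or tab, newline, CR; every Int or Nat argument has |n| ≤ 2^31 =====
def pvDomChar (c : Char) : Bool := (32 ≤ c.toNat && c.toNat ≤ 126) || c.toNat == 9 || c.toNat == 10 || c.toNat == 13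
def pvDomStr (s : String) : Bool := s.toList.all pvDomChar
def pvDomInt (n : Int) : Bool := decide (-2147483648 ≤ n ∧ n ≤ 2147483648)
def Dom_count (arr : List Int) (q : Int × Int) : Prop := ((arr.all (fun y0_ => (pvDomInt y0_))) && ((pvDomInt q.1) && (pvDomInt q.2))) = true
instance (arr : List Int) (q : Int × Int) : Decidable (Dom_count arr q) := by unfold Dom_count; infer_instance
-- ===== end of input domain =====

-- B replaces A's incrementally-maintained frequency hashmap by sorting a copy of the
-- queried slice and scanning consecutive equal runs (alternative strategy, not faster).

-- ===== PORT A =====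
def count (arr : List Int) (q : Int × Int) : Int :=
  let l := q.1
  let r := q.2
  -- for i in range(l, r+1): hashmap[arr[i]] += 1   (defaultdict(int))
  let hashmap : PySem.Dict Int Int :=
    (PySem.List.pyRange l (r + 1) 1).foldl
      (fun d i => d.modify (PySem.List.pyGetD arr i 0) 0 (fun v => v + 1)) PySem.Dict.empty
  -- for key, value in hashmap.items(): if int(key) == value: result += 1
  hashmap.items.foldl (fun result kv => if kv.1 == kv.2 then result + 1 else result) 0

-- ===== PORT B =====
-- the run-length scan of Source B's while loop: peel one run of equal leading elements at a time
def runScan : List Int → Int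
  | [] => 0
  | x :: rest =>
    let run : Int := 1 + ((rest.takeWhile (fun y => y == x)).length : Int)
    (if x == run then 1 else 0) + runScan (rest.dropWhile (fun y => y == x))
termination_by l => l.length
decreasing_by
  simpa using Nat.lt_succ_of_le (List.length_dropWhile_le _ _)

def count_alt (arr : List Int) (q : Int × Int) : Int :=
  let l := q.1
  let r := q.2
  -- sub = sorted(arr[i] for i in range(l, r+1))
  let sub := PySem.List.sorted
    ((PySem.List.pyRange l (r + 1) 1).map (fun i => PySem.List.pyGetD arr i 0))
    (fun x => x) false
  runScan sub

-- ===== PRECONDITION & SPEC =====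
-- Pre_ excludes exactly the queries with an index out of range, where Python A (and B)
-- raise IndexError: when the loop is non-empty (l ≤ r), both endpoints of the contiguous
-- index interval [l, r] must be valid Python indices for arr.
def Pre_count (arr : List Int) (q : Int × Int) : Prop :=
  q.1 ≤ q.2 → (-(arr.length : Int) ≤ q.1 ∧ q.2 < (arr.length : Int))
instance (arr : List Int) (q : Int × Int) : Decidable (Pre_count arr q) := by
  unfold Pre_count; infer_instance

def pvWitness_count : List Int × (Int × Int) := ([1, 2, 2, 7], (0, 2))

def Spec_count (arr : List Int) (q : Int × Int) (out : Int) : Prop := out = count_alt arr q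
instance (arr : List Int) (q : Int × Int) (out : Int) : Decidable (Spec_count arr q out) := by
  unfold Spec_count; infer_instance

-- ===== CLAIM (what is proved, stated in full; the proofs are below) =====
def Claim_equal_count : Prop :=
  ∀ (arr : List Int) (q : Int × Int), Dom_count arr q → Pre_count arr q → Spec_count arr q (count arr q)

-- ===== LEMMAS AND PROOFS =====

-- the common value both ports compute: number of distinct elements v of xs with v = count of v in xs
def tally (xs : List Int) : Int :=
  ((PySem.Set.ofList xs).countP (fun v => v == (xs.count v : Int)) : Int)

lemma countP_nodup_ext (s t : List Int) (p : Int → Bool) (hs : s.Nodup) (ht : t.Nodup)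
    (h : ∀ a, a ∈ s ↔ a ∈ t) : s.countP p = t.countP p :=
  ((List.perm_ext_iff_of_nodup hs ht).mpr h).countP_eq p

-- A side: the items-fold over the counter dict computes tally
lemma counter_fold_eq_tally (xs : List Int) :
    (PySem.Dict.counter xs).items.foldl
      (fun result kv => if kv.1 == kv.2 then result + 1 else result) 0 = tally xs := by
  rw [PySem.Dict.items_counter,
      PySem.List.foldl_if_add_one (fun kv : Int × Int => kv.1 == kv.2),
      List.countP_map]
  simp [tally, Function.comp_def, PySem.Set.ofList]

-- B side: on a sorted list the run-length scan computes tally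
lemma runScan_eq_tally : ∀ (n : Nat) (ys : List Int), ys.length ≤ n →
    ys.Pairwise (· ≤ ·) → runScan ys = tally ys := by
  intro n
  induction n with
  | zero =>
    intro ys hlen _
    have : ys = [] := List.eq_nil_of_length_eq_zero (Nat.le_zero.mp hlen)
    subst this; simp [runScan, tally]
  | succ n ih =>
    intro ys hlen hsorted
    match ys with
    | [] => simp [runScan, tally]
    | x :: rest =>
      set t := rest.takeWhile (fun y => y == x) with htdef
      set d := rest.dropWhile (fun y => y == x) with hddef
      have hrest : t ++ d = rest := List.takeWhile_append_dropWhile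
      have htx : ∀ y ∈ t, y = x := by
        intro y hy
        have := List.mem_takeWhile_imp hy
        simpa using this
      have hxle : ∀ y ∈ rest, x ≤ y := fun y hy => (List.pairwise_cons.mp hsorted).1 y hy
      have hrestsorted : rest.Pairwise (· ≤ ·) := (List.pairwise_cons.mp hsorted).2
      have hdsorted : d.Pairwise (· ≤ ·) := by
        rw [← hrest] at hrestsorted
        exact (List.pairwise_append.mp hrestsorted).2.1
      -- every element of d is ≠ x
      have hdne : ∀ y ∈ d, y ≠ x := by
        intro y hy hyx
        have hne : d ≠ [] := List.ne_nil_of_mem hy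
        have hlenpos : 0 < d.length := List.length_pos_iff.mpr hne
        have h0 := List.dropWhile_get_zero_not (fun y => y == x) rest
          (by simpa [← hddef] using hlenpos)
        have hhd : ¬ ((d[0]'hlenpos == x) = true) := by
          simpa [List.get_eq_getElem] using h0
        have hx0 : x < d[0]'hlenpos := by
          have hmem0 : d[0]'hlenpos ∈ d := List.getElem_mem _
          have hle0 : x ≤ d[0]'hlenpos :=
            hxle _ (by rw [← hrest]; exact List.mem_append_right _ hmem0)
          have hne0 : d[0]'hlenpos ≠ x := by intro he; exact hhd (by simp [he])
          omega
        obtain ⟨j, hj, hyj⟩ := List.getElem_of_mem hy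
        rcases Nat.eq_zero_or_pos j with h0j | h0j
        · subst h0j; omega
        · have := List.pairwise_iff_getElem.mp hdsorted 0 j hlenpos hj h0j; omega
      have hcount_t : t.count x = t.length := by
        rw [List.count_eq_length]; intro y hy; exact (htx y hy).symm
      have hcount_d : d.count x = 0 :=
        List.count_eq_zero.mpr (fun hx => (hdne x hx) rfl)
      have hcount_x : (x :: rest).count x = 1 + t.length := by
        rw [← hrest]; simp [List.count_append, hcount_t, hcount_d]
        omega
      -- counts of non-x elements drop to their counts in d
      have hcount_ne : ∀ v : Int, v ≠ x → (x :: rest).count v = d.count v := by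
        intro v hv
        rw [← hrest]
        have ht0 : t.count v = 0 := by
          refine List.count_eq_zero.mpr (fun hvt => hv (htx v hvt))
        have hv' : ¬ (x = v) := fun h => hv h.symm
        simp [List.count_append, ht0, hv']
      -- the remaining distinct elements are exactly those of d
      have hmem : ∀ a : Int, a ∈ (PySem.Set.ofList rest).discard x ↔ a ∈ PySem.Set.ofList d := by
        intro a
        rw [PySem.Set.mem_discard, PySem.Set.mem_ofList, PySem.Set.mem_ofList]
        constructor
        · rintro ⟨ha, hne⟩
          rw [← hrest] at ha
          rcases List.mem_append.mp ha with h1 | h1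
          · exact absurd (htx a h1) hne
          · exact h1
        · intro ha
          exact ⟨by rw [← hrest]; exact List.mem_append_right _ ha, hdne a ha⟩
      have hlen' : d.length ≤ n := by
        have h1 : d.length ≤ rest.length := hddef ▸ List.length_dropWhile_le _ _
        simp at hlen; omega
      have ihd := ih d hlen' hdsorted
      -- assemble
      rw [show runScan (x :: rest) =
        (if x == (1 + (t.length : Int)) then 1 else 0) + runScan d by
          rw [runScan]]
      rw [ihd]
      unfold tally
      rw [PySem.Set.ofList_cons, List.countP_cons]
      have hstep : ((PySem.Set.ofList rest).discard x).countP
          (fun v => v == (((x :: rest).count v : Int))) =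
          (PySem.Set.ofList d).countP (fun v => v == ((d.count v : Int))) := by
        rw [List.countP_congr (q := fun v => v == ((d.count v : Int)))]
        · exact countP_nodup_ext _ _ _
            (PySem.Set.nodup_discard _ _ (PySem.Set.nodup_ofList rest))
            (PySem.Set.nodup_ofList d) hmem
        · intro v hv
          have hvne : v ≠ x := ((PySem.Set.mem_discard _ _ _).mp hv).2
          simp [hcount_ne v hvne]
      rw [hstep, hcount_x]
      push_cast
      by_cases hx : x = 1 + (t.length : Int)
      · simp [hx]; omega
      · simp [hx]

-- tally is invariant under sorting (a permutation with the same distinct elements and counts)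
lemma tally_sorted (xs : List Int) :
    tally (PySem.List.sorted xs (fun x => x) false) = tally xs := by
  have hperm : (PySem.List.sorted xs (fun x => x) false).Perm xs :=
    PySem.List.sorted_perm xs (fun x => x) false
  unfold tally
  congr 1
  rw [List.countP_congr (q := fun v => v == ((xs.count v : Int)))]
  · exact countP_nodup_ext _ _ _
      (PySem.Set.nodup_ofList _) (PySem.Set.nodup_ofList _)
      (fun a => by rw [PySem.Set.mem_ofList, PySem.Set.mem_ofList]; exact ⟨fun h => hperm.mem_iff.mp h, fun h => hperm.mem_iff.mpr h⟩)
  · intro v _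
    rw [hperm.count_eq]

-- ===== VERDICT (by name: the statement is the Claim_ definition above) =====
theorem count_spec : Claim_equal_count := by
  intro arr q _ _
  unfold Spec_count count count_alt
  set sub := (PySem.List.pyRange q.1 (q.2 + 1) 1).map (fun i => PySem.List.pyGetD arr i 0) with hsub
  have hA : (PySem.List.pyRange q.1 (q.2 + 1) 1).foldl
      (fun d i => d.modify (PySem.List.pyGetD arr i 0) 0 (fun v => v + 1)) PySem.Dict.empty
      = PySem.Dict.counter sub := by
    rw [PySem.Dict.counter_eq_foldl, hsub, List.foldl_map]
  simp only [hA]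
  rw [counter_fold_eq_tally]
  have hsorted := PySem.List.sorted_pairwise sub (fun x => x)
  rw [runScan_eq_tally (PySem.List.sorted sub (fun x => x) false).length _ le_rfl hsorted,
      tally_sorted]
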